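-- pv_equiv track=rewrite | github.com/Liodeus/Crawlmap | crawlmap.py | merge_burp_gospider
-- ===== SOURCE A (Python) =====
-- def merge_burp_gospider(paths_burp, paths_gospider):
-- 	"""
-- 		Merge results from burp and gospider and remove duplicates
--
-- 		Return a sorted list of unique path
-- 	"""
-- 	unique_paths = []
--
-- 	for burp in paths_burp:
-- 		if burp not in unique_paths:
-- 			unique_paths.append(burp)
--
-- 	for gospider in paths_gospider:
-- 		if gospider not in unique_paths:
-- 			unique_paths.append(gospider)
--
-- 	return sorted(unique_paths)
-- ===== SOURCE B (Python) =====
-- def merge_burp_gospider(paths_burp, paths_gospider):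
--     """Merge burp and gospider paths: sort once, then drop adjacent duplicates in one pass."""
--     combined = sorted(paths_burp + paths_gospider)
--     result = []
--     for p in combined:
--         if not result or p != result[-1]:
--             result.append(p)
--     return result
-- ===== Notes on version B (the rewrite author's own statement) =====
-- stated objective: faster
-- what changed: Replaces A's repeated linear membership scans over the growing unique list with a single sort of the concatenation followed by one linear adjacent-duplicate-removal pass.
import Mathlib
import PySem

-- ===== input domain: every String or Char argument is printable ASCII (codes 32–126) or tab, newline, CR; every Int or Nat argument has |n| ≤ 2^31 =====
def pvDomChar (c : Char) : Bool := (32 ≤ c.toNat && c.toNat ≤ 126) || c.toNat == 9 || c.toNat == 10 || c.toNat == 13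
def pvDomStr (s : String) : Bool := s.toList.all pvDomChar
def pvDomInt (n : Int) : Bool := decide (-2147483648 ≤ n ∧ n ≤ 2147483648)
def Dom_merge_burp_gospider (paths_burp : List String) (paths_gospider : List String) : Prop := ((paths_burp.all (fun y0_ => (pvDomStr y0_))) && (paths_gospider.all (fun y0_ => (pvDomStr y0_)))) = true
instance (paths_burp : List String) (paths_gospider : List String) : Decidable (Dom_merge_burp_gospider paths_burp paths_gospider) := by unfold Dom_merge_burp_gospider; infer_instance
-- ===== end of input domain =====

-- B sorts the concatenation once and removes adjacent duplicates in one linear pass,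
-- instead of A's repeated membership scans over a growing unique list; proved equal on all inputs.


-- ===== PORT A =====
-- 'if burp not in unique_paths: unique_paths.append(burp)', one fold per source list
def mergeStep (acc : List String) (x : String) : List String :=
  if x ∈ acc then acc else acc ++ [x]

def merge_burp_gospider (paths_burp : List String) (paths_gospider : List String) : List String :=
  let unique_paths : List String := []
  let unique_paths := paths_burp.foldl mergeStep unique_paths
  let unique_paths := paths_gospider.foldl mergeStep unique_paths
  PySem.List.sorted unique_paths (fun x => x) false

-- ===== PORT B =====
-- 'if not result or p != result[-1]: result.append(p)' — the two-part Python test is exactly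
-- 'acc.getLast? ≠ some p' (getLast? [] = none covers 'not result'; result[-1] is getLast?)
def dedupStep (acc : List String) (p : String) : List String :=
  if acc.getLast? ≠ some p then acc ++ [p] else acc

def merge_burp_gospider_alt (paths_burp : List String) (paths_gospider : List String) : List String :=
  let combined := PySem.List.sorted (paths_burp ++ paths_gospider) (fun x => x) false
  combined.foldl dedupStep []

-- ===== PRECONDITION & SPEC =====
def Spec_merge_burp_gospider (paths_burp : List String) (paths_gospider : List String) (out : List String) : Prop := out = merge_burp_gospider_alt paths_burp paths_gospider
instance (paths_burp : List String) (paths_gospider : List String) (out : List String) : Decidable (Spec_merge_burp_gospider paths_burp paths_gospider out) := by unfold Spec_merge_burp_gospider; infer_instance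

-- ===== CLAIM (what is proved, stated in full; the proofs are below) =====
def Claim_equal_merge_burp_gospider : Prop := ∀ (paths_burp : List String) (paths_gospider : List String), Dom_merge_burp_gospider paths_burp paths_gospider → Spec_merge_burp_gospider paths_burp paths_gospider (merge_burp_gospider paths_burp paths_gospider)

-- ===== LEMMAS AND PROOFS =====

-- B's fold is adjacent-duplicate removal, i.e. List.destutter (· ≠ ·)
theorem foldl_dedupStep_append (l : List String) : ∀ (ys : List String) (y : String),
    (l.foldl dedupStep (ys ++ [y])) = ys ++ List.destutter' (· ≠ ·) y l := by
  induction l with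
  | nil => intro ys y; simp [List.destutter'_nil]
  | cons p rest ih =>
    intro ys y
    simp only [List.foldl_cons, dedupStep, List.getLast?_append, List.getLast?_singleton,
      List.destutter'_cons]
    by_cases h : y = p
    · subst h; simp [ih]
    · have : ¬ (Option.some y ≠ some p) = False := by simp [h]
      rw [if_pos (by simpa using h), if_pos (by simpa using Ne.symm (Ne.symm h))]
      rw [show ys ++ [y] ++ [p] = (ys ++ [y]) ++ [p] by simp, ih (ys ++ [y]) p]
      simp

theorem foldl_dedupStep_eq_destutter (l : List String) :
    l.foldl dedupStep [] = l.destutter (· ≠ ·) := by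
  cases l with
  | nil => rfl
  | cons x rest =>
    have h0 : dedupStep [] x = [] ++ [x] := by simp [dedupStep]
    simp only [List.foldl_cons, h0]
    rw [foldl_dedupStep_append rest [] x]
    simp [List.destutter_cons']

-- A's folds: membership-guarded append preserves Nodup and collects the union of members
theorem foldl_mergeStep_nodup (l : List String) : ∀ (acc : List String), acc.Nodup →
    (l.foldl mergeStep acc).Nodup := by
  induction l with
  | nil => intro acc h; simpa using h
  | cons x rest ih =>
    intro acc h
    simp only [List.foldl_cons, mergeStep]
    by_cases hx : x ∈ acc
    · rw [if_pos hx]; exact ih acc h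
    · rw [if_neg hx]
      refine ih _ ?_
      rw [List.nodup_append]
      exact ⟨h, List.nodup_singleton x, by
        intro a ha b hb
        simp only [List.mem_singleton] at hb
        subst hb
        exact fun he => hx (he ▸ ha)⟩

theorem mem_foldl_mergeStep (l : List String) : ∀ (acc : List String) (a : String),
    a ∈ l.foldl mergeStep acc ↔ a ∈ acc ∨ a ∈ l := by
  induction l with
  | nil => intro acc a; simp
  | cons x rest ih =>
    intro acc a
    simp only [List.foldl_cons, mergeStep]
    by_cases hx : x ∈ acc
    · rw [if_pos hx, ih]
      constructor
      · rintro (h | h) <;> simp [h]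
      · rintro (h | h)
        · exact Or.inl h
        · rcases List.mem_cons.mp h with rfl | h
          · exact Or.inl hx
          · exact Or.inr h
    · rw [if_neg hx, ih]
      simp only [List.mem_append, List.mem_cons]
      tauto

-- ===== VERDICT (by name: the statement is the Claim_ definition above) =====
theorem merge_burp_gospider_spec : Claim_equal_merge_burp_gospider := by
  intro paths_burp paths_gospider _
  unfold Spec_merge_burp_gospider merge_burp_gospider merge_burp_gospider_alt
  simp only []
  set U := paths_gospider.foldl mergeStep (paths_burp.foldl mergeStep []) with hU
  set C := PySem.List.sorted (paths_burp ++ paths_gospider) (fun x => x) false with hC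
  -- B's result is C.destutter (· ≠ ·)
  rw [foldl_dedupStep_eq_destutter]
  set R := C.destutter (· ≠ ·) with hR
  -- C is sorted (Pairwise ≤)
  have hCpw : C.Pairwise (· ≤ ·) := by
    simpa using PySem.List.sorted_pairwise (paths_burp ++ paths_gospider) (fun x => x)
  have hCmem : ∀ a : String, a ∈ C ↔ a ∈ paths_burp ++ paths_gospider := by
    intro a; exact PySem.List.mem_sorted _ _ _ _
  -- destutter of a ≤-sorted list has the same members (it equals dedup)
  haveI : Std.Antisymm ((· ≤ ·) : String → String → Prop) := ⟨fun _ _ => le_antisymm⟩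
  have hRd : R = C.dedup := hCpw.destutter_eq_dedup
  have hRmem : ∀ a : String, a ∈ R ↔ a ∈ paths_burp ++ paths_gospider := by
    intro a; rw [hRd, List.mem_dedup]; exact hCmem a
  have hRnd : R.Nodup := by rw [hRd]; exact C.nodup_dedup
  -- R is strictly increasing: Pairwise ≤ (sublist of C) + Nodup
  have hRle : R.Pairwise (· ≤ ·) := hCpw.sublist (C.destutter_sublist (· ≠ ·))
  have hRlt : R.Pairwise (· < ·) := by
    have := hRle.and hRnd
    exact this.imp (fun h => lt_of_le_of_ne h.1 h.2)
  -- A's unique list: Nodup, same members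
  have hUnd : U.Nodup := foldl_mergeStep_nodup _ _ (foldl_mergeStep_nodup _ [] List.nodup_nil)
  have hUmem : ∀ a : String, a ∈ U ↔ a ∈ paths_burp ++ paths_gospider := by
    intro a
    rw [hU, mem_foldl_mergeStep, mem_foldl_mergeStep]
    simp only [List.mem_append]
    tauto
  -- R is a permutation of U, hence the sorted order of U
  have hperm : R.Perm U := by
    rw [List.perm_ext_iff_of_nodup hRnd hUnd]
    intro a; rw [hRmem a, hUmem a]
  exact (PySem.List.sorted_eq_of_perm_of_pairwise_lt U R (fun x => x) hperm (by simpa using hRlt))
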